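-- pv_equiv track=rewrite | github.com/kaosi-anikwe/phenomap | app/modules/populate.py | generate_syndrome_code
-- ===== SOURCE A (Python) =====
-- def generate_syndrome_code(title, category, existing_codes):
--     """
--     Generate a unique syndrome code based on:
--     - First letter of category (A-Z)
--     - First 3 consonants from the syndrome name (uppercase)
--     - 3 digit number sequence starting from 001
--     """
--     # Get first letter of category (use first letter of title if no category)
--     cat_letter = title[0].upper()
--
--     # Get consonants from title
--     consonants = "".join(
--         c.upper() for c in title if c.upper() in "BCDFGHJKLMNPQRSTVWXYZ"
--     )
--     if len(consonants) < 3: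
--         # Pad with X if not enough consonants
--         consonants = (consonants + "XXX")[:3]
--     else:
--         consonants = consonants[:3]
--
--     # Create base code
--     base_code = f"{cat_letter}{consonants}"
--
--     # Try numbers until we find an unused code
--     counter = 1
--     while True:
--         code = f"{base_code}{counter:03d}"
--         if code not in existing_codes:
--             return code
--         counter += 1
-- ===== SOURCE B (Python) =====
-- def generate_syndrome_code(title, category, existing_codes):
--     cat_letter = title[0].upper()
--     consonants = "".join(
--         c.upper() for c in title if c.upper() in "BCDFGHJKLMNPQRSTVWXYZ"
--     )
--     base = cat_letter + (consonants + "XXX")[:3]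
--     # One pass: recover the sequence number of every existing code of the form
--     # base + f"{n:03d}" (digit suffix whose canonical 03d formatting matches).
--     used = []
--     for code in existing_codes:
--         if code.startswith(base):
--             suffix = code[len(base):]
--             if suffix.isdigit():
--                 n = 0
--                 for ch in suffix:
--                     n = 10 * n + (ord(ch) - 48)
--                 if f"{n:03d}" == suffix:
--                     used.append(n)
--     # Smallest free number: scan the sorted distinct used numbers for the first gap.
--     ans = 1
--     for m in sorted(set(used)):
--         if m == ans:
--             ans += 1
--         elif m > ans:
--             break
--     return f"{base}{ans:03d}"
-- ===== Notes on version B (the rewrite author's own statement) =====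
-- stated objective: alternative
-- what changed: B never probes candidate codes: it parses the numeric suffix out of each existing code that matches the base+3-digit pattern in one pass, then finds the smallest free number by a first-gap scan over the sorted distinct parsed numbers, instead of A's while-loop that rescans the whole list for every counter value.
import Mathlib
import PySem

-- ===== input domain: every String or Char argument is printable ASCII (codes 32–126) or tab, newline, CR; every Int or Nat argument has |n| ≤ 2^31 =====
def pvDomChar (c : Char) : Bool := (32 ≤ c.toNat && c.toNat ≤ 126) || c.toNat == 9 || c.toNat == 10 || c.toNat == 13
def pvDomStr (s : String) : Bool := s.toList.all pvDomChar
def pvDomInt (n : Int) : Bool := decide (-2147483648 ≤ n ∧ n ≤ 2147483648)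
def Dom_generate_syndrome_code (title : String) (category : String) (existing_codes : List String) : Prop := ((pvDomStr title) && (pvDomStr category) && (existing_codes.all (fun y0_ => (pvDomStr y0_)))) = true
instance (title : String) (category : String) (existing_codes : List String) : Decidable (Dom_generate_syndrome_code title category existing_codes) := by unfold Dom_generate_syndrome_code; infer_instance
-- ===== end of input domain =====

-- B does not probe candidate codes: it parses the 3-digit-formatted numeric suffixes out of the
-- existing codes in one pass and finds the smallest free number by a first-gap scan over their
-- sorted distinct values (alternative algorithm, same result).


-- ===== PORT A =====
def pvConsonants : List Char := "BCDFGHJKLMNPQRSTVWXYZ".toList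

-- f"{n:03d}" (n ≥ 1 everywhere it is applied: str(n) zero-padded to width 3; exact there)
def pvFmt3 (n : Int) : List Char := PySem.Chars.zfill (PySem.Int.toChars n) 3

-- cat_letter / consonants / base_code, with A's `if len(consonants) < 3` branch
def pvBaseA (title : String) : List Char :=
  let t := title.toList
  let cat_letter := PySem.Chars.upperChar (t.headD ' ')   -- title[0]; Pre_ excludes empty title (IndexError)
  let consonants := t.filterMap (fun c =>
    let u := PySem.Chars.upperChar c
    if u ∈ pvConsonants then some u else none)
  let consonants3 := if consonants.length < 3
    then (consonants ++ "XXX".toList).take 3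
    else consonants.take 3
  cat_letter :: consonants3

-- A's `while True` tries counters 1,2,…; among any existing_codes.length+1 distinct candidate
-- codes one is free, so this fuel is never exhausted (the fuel-0 value is unreachable).
def pvLoopA (codes : List String) (base : List Char) : Nat → Int → String
  | 0, counter => String.ofList (base ++ pvFmt3 counter)
  | fuel+1, counter =>
    let code := String.ofList (base ++ pvFmt3 counter)
    if code ∈ codes then pvLoopA codes base fuel (counter + 1) else code

def generate_syndrome_code (title : String) (category : String) (existing_codes : List String) : String :=
  pvLoopA existing_codes (pvBaseA title) (existing_codes.length + 1) 1

-- ===== PORT B =====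
-- B's base_code: cat_letter + (consonants + "XXX")[:3], no branch
def pvBaseB (title : String) : List Char :=
  let t := title.toList
  let cat_letter := PySem.Chars.upperChar (t.headD ' ')   -- title[0]; Pre_ excludes empty title (IndexError)
  let consonants := t.filterMap (fun c =>
    let u := PySem.Chars.upperChar c
    if u ∈ pvConsonants then some u else none)
  cat_letter :: (consonants ++ "XXX".toList).take 3

-- `n = 10 * n + (ord(ch) - 48)` accumulated over the suffix
def pvDigitVal (c : Char) : Int := (c.toNat : Int) - 48
def pvHorner (cs : List Char) : Int := cs.foldl (fun n c => 10 * n + pvDigitVal c) 0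

-- the body of B's first loop: the sequence number of an existing code, if it has one
def pvParse (base : List Char) (code : String) : Option Int :=
  if PySem.Chars.startswith code.toList base then
    let suffix := PySem.List.slice code.toList (some (base.length : Int)) none
    if PySem.Chars.strIsdigit suffix then
      let n := pvHorner suffix
      if pvFmt3 n == suffix then some n else none
    else none
  else none

-- `for m in sorted(set(used)): if m == ans: ans += 1; elif m > ans: break`
def pvScan : List Int → Int → Int
  | [], ans => ans
  | m :: rest, ans =>
    if m = ans then pvScan rest (ans + 1)
    else if ans < m then ans
    else pvScan rest ans

def generate_syndrome_code_alt (title : String) (category : String) (existing_codes : List String) : String :=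
  let base := pvBaseB title
  let used := existing_codes.filterMap (pvParse base)
  let ans := pvScan (PySem.List.sorted (PySem.Set.ofList used) (fun x => x) false) 1
  String.ofList (base ++ pvFmt3 ans)

-- ===== PRECONDITION & SPEC =====
-- Pre_ excludes only the empty title, on which A (title[0]) raises IndexError.
def Pre_generate_syndrome_code (title : String) (category : String) (existing_codes : List String) : Prop :=
  title ≠ ""
instance (title : String) (category : String) (existing_codes : List String) : Decidable (Pre_generate_syndrome_code title category existing_codes) := by unfold Pre_generate_syndrome_code; infer_instance
def pvWitness_generate_syndrome_code : String × String × List String :=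
  ("Alpha", "Cat", ["ALPH001"])

def Spec_generate_syndrome_code (title : String) (category : String) (existing_codes : List String) (out : String) : Prop := out = generate_syndrome_code_alt title category existing_codes
instance (title : String) (category : String) (existing_codes : List String) (out : String) : Decidable (Spec_generate_syndrome_code title category existing_codes out) := by unfold Spec_generate_syndrome_code; infer_instance

-- ===== CLAIM (what is proved, stated in full; the proofs are below) =====
def Claim_equal_generate_syndrome_code : Prop := ∀ (title : String) (category : String) (existing_codes : List String), Dom_generate_syndrome_code title category existing_codes → Pre_generate_syndrome_code title category existing_codes → Spec_generate_syndrome_code title category existing_codes (generate_syndrome_code title category existing_codes)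

-- ===== LEMMAS AND PROOFS =====

-- the two prefix computations agree
theorem pvBase_eq (title : String) : pvBaseA title = pvBaseB title := by
  dsimp only [pvBaseA, pvBaseB]
  split_ifs with h
  · rfl
  · rw [List.take_append_of_le_length (by omega)]

-- big-endian decimal digits of a Nat, as recursion on the value (proof-side mirror of Nat.toDigits)
def pvRep (m : Nat) : List Char :=
  if m < 10 then [Nat.digitChar m]
  else pvRep (m / 10) ++ [Nat.digitChar (m % 10)]
decreasing_by exact Nat.div_lt_self (by omega) (by omega)

theorem pvToDigitsCore_eq (f : Nat) : ∀ (n : Nat) (acc : List Char), n < f →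
    Nat.toDigitsCore 10 f n acc = pvRep n ++ acc := by
  induction f with
  | zero => intro n acc h; omega
  | succ f ih =>
    intro n acc h
    rw [Nat.toDigitsCore]
    by_cases h10 : n / 10 = 0
    · have hn : n < 10 := by omega
      rw [if_pos h10, pvRep, if_pos hn, Nat.mod_eq_of_lt hn]
      rfl
    · have hn10 : 10 ≤ n := by omega
      have hlt : n / 10 < f := by omega
      rw [if_neg h10, ih (n / 10) _ hlt]
      conv_rhs => rw [pvRep]
      rw [if_neg (by omega)]
      simp

theorem pvToDigits_eq (m : Nat) : Nat.toDigits 10 m = pvRep m := by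
  have := pvToDigitsCore_eq (m + 1) m [] (by omega)
  simpa [Nat.toDigits] using this

theorem pvDigitChar_isdigit (k : Nat) (hk : k < 10) :
    PySem.Chars.isdigit (Nat.digitChar k) = true := by
  interval_cases k <;> decide

theorem pvRep_isdigit (m : Nat) : ∀ c ∈ pvRep m, PySem.Chars.isdigit c = true := by
  induction m using Nat.strong_induction_on with
  | _ m ih =>
    intro c hc
    rw [pvRep] at hc
    by_cases h : m < 10
    · rw [if_pos h] at hc
      simp only [List.mem_singleton] at hc
      subst hc
      exact pvDigitChar_isdigit m h
    · rw [if_neg h] at hc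
      rcases List.mem_append.mp hc with h1 | h1
      · exact ih (m / 10) (Nat.div_lt_self (by omega) (by omega)) c h1
      · simp only [List.mem_singleton] at h1
        subst h1
        exact pvDigitChar_isdigit (m % 10) (Nat.mod_lt _ (by omega))

theorem pvRep_ne_nil (m : Nat) : pvRep m ≠ [] := by
  rw [pvRep]
  split_ifs <;> simp

theorem pvDigitVal_digitChar (k : Nat) (hk : k < 10) :
    pvDigitVal (Nat.digitChar k) = (k : Int) := by
  interval_cases k <;> decide

theorem pvHorner_rep (m : Nat) : ∀ (a : Int),
    (pvRep m).foldl (fun n c => 10 * n + pvDigitVal c) a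
      = a * 10 ^ (pvRep m).length + (m : Int) := by
  induction m using Nat.strong_induction_on with
  | _ m ih =>
    intro a
    rw [pvRep]
    by_cases h : m < 10
    · rw [if_pos h]
      simp [pvDigitVal_digitChar m h]
      ring
    · rw [if_neg h]
      rw [List.foldl_append, ih (m / 10) (Nat.div_lt_self (by omega) (by omega)) a]
      simp only [List.foldl_cons, List.foldl_nil, List.length_append, List.length_singleton]
      rw [pvDigitVal_digitChar (m % 10) (Nat.mod_lt _ (by omega))]
      have h2 : (m : Int) = 10 * ((m / 10 : Nat) : Int) + ((m % 10 : Nat) : Int) := by omega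
      rw [pow_succ, h2]
      ring

-- zfill on a digit-leading list is plain left padding
theorem pvZfill_digits (c : Char) (rest : List Char) (h1 : c ≠ '+') (h2 : c ≠ '-') :
    PySem.Chars.zfill (c :: rest) 3
      = List.replicate (3 - (c :: rest).length) '0' ++ (c :: rest) := by
  rw [PySem.Chars.zfill]
  split_ifs with hl hpm
  · have : 3 - (c :: rest).length = 0 := by
      simp only [List.length_cons] at hl ⊢
      omega
    rw [this]
    rfl
  · rcases hpm with h | h
    · exact absurd h h1
    · exact absurd h h2
  · rfl

theorem pvFmt3_eq (n : Int) (hn : 1 ≤ n) :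
    pvFmt3 n = List.replicate (3 - (pvRep n.toNat).length) '0' ++ pvRep n.toNat := by
  have hneg : ¬ n < 0 := by omega
  rw [pvFmt3, PySem.Int.toChars, if_neg hneg, pvToDigits_eq]
  obtain ⟨c, rest, hcr⟩ : ∃ c rest, pvRep n.toNat = c :: rest := by
    cases h : pvRep n.toNat with
    | nil => exact absurd h (pvRep_ne_nil _)
    | cons c rest => exact ⟨c, rest, rfl⟩
  have hc : PySem.Chars.isdigit c = true := pvRep_isdigit _ c (by rw [hcr]; simp)
  rw [hcr]
  refine pvZfill_digits c rest (fun hp => ?_) (fun hp => ?_) <;>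
    · rw [hp] at hc
      exact absurd hc (by decide)

theorem pvFmt3_isdigit (n : Int) (hn : 1 ≤ n) :
    PySem.Chars.strIsdigit (pvFmt3 n) = true := by
  rw [pvFmt3_eq n hn, PySem.Chars.strIsdigit]
  have hne : pvRep n.toNat ≠ [] := pvRep_ne_nil _
  simp only [Bool.and_eq_true, Bool.not_eq_true', List.isEmpty_eq_false_iff, List.all_eq_true]
  constructor
  · simp [hne]
  · intro c hc
    rcases List.mem_append.mp hc with h | h
    · rw [List.eq_of_mem_replicate h]; decide
    · exact pvRep_isdigit _ c h

theorem pvHorner_replicate_zero (k : Nat) :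
    ∀ cs : List Char, (List.replicate k '0' ++ cs).foldl (fun n c => 10 * n + pvDigitVal c) 0
      = cs.foldl (fun n c => 10 * n + pvDigitVal c) 0 := by
  induction k with
  | zero => intro cs; rfl
  | succ k ih =>
    intro cs
    rw [List.replicate_succ, List.cons_append, List.foldl_cons]
    have : (10 : Int) * 0 + pvDigitVal '0' = 0 := by decide
    rw [this, ih]

theorem pvHorner_fmt3 (n : Int) (hn : 1 ≤ n) : pvHorner (pvFmt3 n) = n := by
  rw [pvFmt3_eq n hn, pvHorner, pvHorner_replicate_zero, pvHorner_rep]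
  simp
  omega

-- a code counts as used for number n (n ≥ 1) exactly when it IS the candidate code of n
theorem pvParse_mem (base : List Char) (codes : List String) (n : Int) (hn : 1 ≤ n) :
    n ∈ codes.filterMap (pvParse base) ↔ String.ofList (base ++ pvFmt3 n) ∈ codes := by
  rw [List.mem_filterMap]
  constructor
  · rintro ⟨c, hc, hp⟩
    simp only [pvParse] at hp
    split_ifs at hp with hsw hdig hfmt
    · obtain ⟨u, hu⟩ := (PySem.Chars.startswith_iff _ _).mp hsw
      rw [PySem.List.slice_from_natCast, ← hu, List.drop_left] at hp hfmt
      have hfmt' : pvFmt3 (pvHorner u) = u := by simpa using hfmt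
      have hn' : pvHorner u = n := by simpa using hp
      have : c.toList = base ++ pvFmt3 n := by rw [← hn', hfmt', hu]
      rw [← this, String.ofList_toList]
      exact hc
  · intro hmem
    refine ⟨String.ofList (base ++ pvFmt3 n), hmem, ?_⟩
    simp only [pvParse]
    have hsw : PySem.Chars.startswith (String.ofList (base ++ pvFmt3 n)).toList base = true := by
      rw [PySem.Chars.startswith_iff, String.toList_ofList]
      exact ⟨pvFmt3 n, rfl⟩
    rw [if_pos hsw, PySem.List.slice_from_natCast, String.toList_ofList, List.drop_left,
      if_pos (pvFmt3_isdigit n hn), pvHorner_fmt3 n hn, if_pos (by simp)]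

-- candidate codes of distinct numbers ≥ 1 are distinct
theorem pvCode_inj (base : List Char) (a b : Int) (ha : 1 ≤ a) (hb : 1 ≤ b)
    (h : String.ofList (base ++ pvFmt3 a) = String.ofList (base ++ pvFmt3 b)) : a = b := by
  have h' := congrArg String.toList h
  rw [String.toList_ofList, String.toList_ofList] at h'
  have hf : pvFmt3 a = pvFmt3 b := List.append_cancel_left h'
  rw [← pvHorner_fmt3 a ha, ← pvHorner_fmt3 b hb, hf]

-- the gap scan on a strictly increasing list returns the smallest value ≥ a that is absent
theorem pvScan_spec : ∀ (S : List Int), S.Pairwise (· < ·) → ∀ (a : Int),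
    a ≤ pvScan S a ∧ pvScan S a ∉ S ∧ ∀ k, a ≤ k → k < pvScan S a → k ∈ S := by
  intro S
  induction S with
  | nil =>
    intro _ a
    simp only [pvScan]
    exact ⟨le_refl a, by simp, fun k h1 h2 => absurd h2 (by omega)⟩
  | cons m rest ih =>
    intro hp a
    have hm : ∀ x ∈ rest, m < x := (List.pairwise_cons.mp hp).1
    have hrest := (List.pairwise_cons.mp hp).2
    rw [pvScan]
    split_ifs with heq hlt
    · subst heq
      obtain ⟨h1, h2, h3⟩ := ih hrest (m + 1)
      refine ⟨by omega, ?_, ?_⟩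
      · simp only [List.mem_cons, not_or]
        exact ⟨by omega, h2⟩
      · intro k hk1 hk2
        rcases eq_or_lt_of_le hk1 with h | h
        · simp [← h]
        · exact List.mem_cons_of_mem _ (h3 k (by omega) hk2)
    · refine ⟨le_refl a, ?_, ?_⟩
      · simp only [List.mem_cons, not_or]
        exact ⟨by omega, fun hmem => by have := hm a hmem; omega⟩
      · intro k h1 h2; omega
    · have hma : m < a := by omega
      obtain ⟨h1, h2, h3⟩ := ih hrest a
      refine ⟨h1, ?_, ?_⟩
      · simp only [List.mem_cons, not_or]
        exact ⟨by omega, h2⟩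
      · intro k hk1 hk2
        exact List.mem_cons_of_mem _ (h3 k hk1 hk2)

-- ===== the main proof =====
theorem pvLoopA_eq (codes : List String) (base : List Char) :
    ∀ (fuel : Nat) (a r : Int), a ≤ r → r < a + fuel →
    (∀ k, a ≤ k → k < r → String.ofList (base ++ pvFmt3 k) ∈ codes) →
    String.ofList (base ++ pvFmt3 r) ∉ codes →
    pvLoopA codes base fuel a = String.ofList (base ++ pvFmt3 r) := by
  intro fuel
  induction fuel with
  | zero => intro a r h1 h2; omega
  | succ f ih =>
    intro a r h1 h2 hall hfree
    rw [pvLoopA]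
    by_cases hmem : String.ofList (base ++ pvFmt3 a) ∈ codes
    · have hne : a ≠ r := fun h => hfree (h ▸ hmem)
      rw [if_pos hmem]
      exact ih (a + 1) r (by omega) (by omega) (fun k hk1 hk2 => hall k (by omega) hk2) hfree
    · have : r = a := by
        rcases eq_or_lt_of_le h1 with h | h
        · omega
        · exact absurd (hall a (le_refl a) h) hmem
      subst this
      rw [if_neg hmem]

theorem pvMain (codes : List String) (base : List Char) :
    pvLoopA codes base (codes.length + 1) 1
      = String.ofList (base ++
          pvFmt3 (pvScan (PySem.List.sorted (PySem.Set.ofList (codes.filterMap (pvParse base))) (fun x => x) false) 1)) := by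
  set used := codes.filterMap (pvParse base) with hused
  set S := PySem.List.sorted (PySem.Set.ofList used) (fun x => x) false with hS
  have hpair : S.Pairwise (· < ·) := PySem.List.sorted_ofList_pairwise_lt used
  have hmemS : ∀ k, k ∈ S ↔ k ∈ used := by
    intro k
    rw [hS, PySem.List.mem_sorted, PySem.Set.mem_ofList]
  obtain ⟨h1, h2, h3⟩ := pvScan_spec S hpair 1
  set r := pvScan S 1 with hr
  have hall : ∀ k, 1 ≤ k → k < r → String.ofList (base ++ pvFmt3 k) ∈ codes := by
    intro k hk1 hk2
    exact (pvParse_mem base codes k hk1).mp ((hmemS k).mp (h3 k hk1 hk2))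
  have hfree : String.ofList (base ++ pvFmt3 r) ∉ codes := by
    intro hc
    exact h2 ((hmemS r).mpr ((pvParse_mem base codes r h1).mpr hc))
  -- pigeonhole: r ≤ codes.length + 1
  have hbound : r < 1 + (codes.length + 1 : Nat) := by
    by_contra hcon
    rw [not_lt] at hcon
    set L := (PySem.List.pyRange 1 ((codes.length : Int) + 2) 1).map
      (fun k => String.ofList (base ++ pvFmt3 k)) with hL
    have hsub : ∀ x ∈ L, x ∈ codes := by
      intro x hx
      rw [hL] at hx
      obtain ⟨k, hk, hkx⟩ := List.mem_map.mp hx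
      obtain ⟨hk1, hk2⟩ := (PySem.List.mem_pyRange_one).mp hk
      subst hkx
      push_cast at hcon
      exact hall k hk1 (by omega)
    have hnd : L.Nodup := by
      rw [hL]
      refine (PySem.List.nodup_pyRange_one _ _).map_on ?_
      intro a ha b hb hab
      exact pvCode_inj base a b ((PySem.List.mem_pyRange_one).mp ha).1
        ((PySem.List.mem_pyRange_one).mp hb).1 hab
    have hlen : L.length = codes.length + 1 := by
      rw [hL, List.length_map, PySem.List.length_pyRange_one]
      omega
    have hc1 : L.toFinset.card = L.length := List.toFinset_card_of_nodup hnd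
    have hc2 : codes.toFinset.card ≤ codes.length := codes.toFinset_card_le
    have hc3 : L.toFinset ⊆ codes.toFinset := by
      intro x hx
      simp only [List.mem_toFinset] at hx ⊢
      exact hsub x hx
    have := Finset.card_le_card hc3
    omega
  exact pvLoopA_eq codes base (codes.length + 1) 1 r h1 (by push_cast at hbound ⊢; omega) hall hfree

-- ===== VERDICT (by name: the statement is the Claim_ definition above) =====
theorem generate_syndrome_code_spec : Claim_equal_generate_syndrome_code := by
  intro title category existing_codes _ _
  show generate_syndrome_code title category existing_codes
      = generate_syndrome_code_alt title category existing_codes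
  unfold generate_syndrome_code generate_syndrome_code_alt
  rw [pvBase_eq]
  exact pvMain existing_codes (pvBaseB title)
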